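-- pv_equiv track=rewrite | github.com/DanielCortild/Google-KickStart | 2018/2018B-1.py | isLegal
-- ===== SOURCE A (Python) =====
-- def isLegal(n):
--   if n % 9 == 0:
--     return 0
--   n_list = [c for c in str(n)]
--   for k in n_list:
--     if k == '9':
--       return 0
--   return 1
-- ===== SOURCE B (Python) =====
-- def isLegal(n):
--     s = 0
--     has9 = False
--     for c in str(n):
--         if c == '-':
--             continue
--         s += ord(c) - 48
--         has9 = has9 or c == '9'
--     return 0 if has9 or s % 9 == 0 else 1
-- ===== Notes on version B (the rewrite author's own statement) =====
-- stated objective: alternative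
-- what changed: Replaces A's arithmetic modulus test plus a separate character scan with a single pass over str(n) that accumulates the digit sum (skipping the sign) and a nine-digit flag, deciding divisibility by nine via the digit-sum rule.
import Mathlib
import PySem

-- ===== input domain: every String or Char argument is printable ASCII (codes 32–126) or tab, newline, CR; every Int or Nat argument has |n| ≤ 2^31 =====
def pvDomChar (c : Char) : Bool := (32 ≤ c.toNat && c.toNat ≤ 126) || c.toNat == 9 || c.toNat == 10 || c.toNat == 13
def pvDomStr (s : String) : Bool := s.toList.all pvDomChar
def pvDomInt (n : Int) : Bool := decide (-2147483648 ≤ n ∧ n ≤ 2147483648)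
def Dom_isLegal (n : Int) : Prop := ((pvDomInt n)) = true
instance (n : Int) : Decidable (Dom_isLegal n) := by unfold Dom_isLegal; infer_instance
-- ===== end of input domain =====

-- ===== PORT A =====
-- B replaces A's n % 9 arithmetic test with the digit-sum-mod-9 rule folded into one scan of str(n).

-- A's for-loop with early return over the characters of str(n)
def isLegalLoop : List Char → Int
  | [] => 1
  | k :: rest => if k = '9' then 0 else isLegalLoop rest

def isLegal (n : Int) : Int :=
  if PySem.Int.mod n 9 = 0 then 0
  else
    let n_list := (PySem.Int.toStr n).toList
    isLegalLoop n_list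

-- ===== PORT B =====
-- one step of B's loop body: state is (digit sum, has9 flag)
def altStep (acc : Int × Bool) (c : Char) : Int × Bool :=
  if c = '-' then acc
  else (acc.1 + ((c.toNat : Int) - 48), acc.2 || c == '9')

def isLegal_alt (n : Int) : Int :=
  let r := (PySem.Int.toStr n).toList.foldl altStep (0, false)
  if r.2 || PySem.Int.mod r.1 9 = 0 then 0 else 1

-- ===== PRECONDITION & SPEC =====
def Spec_isLegal (n : Int) (out : Int) : Prop := out = isLegal_alt n
instance (n : Int) (out : Int) : Decidable (Spec_isLegal n out) := by unfold Spec_isLegal; infer_instance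

-- ===== CLAIM (what is proved, stated in full; the proofs are below) =====
def Claim_equal_isLegal : Prop := ∀ (n : Int), Dom_isLegal n → Spec_isLegal n (isLegal n)

-- ===== LEMMAS AND PROOFS =====

-- digit sum (per B: the '-' character contributes 0)
def charSum : List Char → Int
  | [] => 0
  | c :: cs => (if c = '-' then 0 else (c.toNat : Int) - 48) + charSum cs

lemma foldl_altStep (cs : List Char) : ∀ s f,
    cs.foldl altStep (s, f) = (s + charSum cs, f || cs.contains '9') := by
  induction cs with
  | nil => intro s f; simp [charSum]
  | cons c cs ih =>
    intro s f
    rw [List.foldl]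
    by_cases hc : c = '-'
    · subst hc
      rw [show altStep (s, f) '-' = (s, f) from rfl, ih, charSum]
      simp
    · rw [show altStep (s, f) c = (s + ((c.toNat : Int) - 48), f || (c == '9')) from
        (by simp [altStep, hc]), ih, charSum, if_neg hc]
      simp only [Prod.mk.injEq]
      exact ⟨by ring, by simp [Bool.or_assoc, eq_comm, Bool.beq_eq_decide_eq]⟩

lemma isLegalLoop_eq (cs : List Char) :
    isLegalLoop cs = if cs.contains '9' then 0 else 1 := by
  induction cs with
  | nil => simp [isLegalLoop]
  | cons c cs ih =>
    by_cases hc : c = '9'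
    · subst hc; simp [isLegalLoop]
    · simp [isLegalLoop, hc, ih, eq_comm]

lemma charSum_toDigitsCore (fuel : Nat) : ∀ (n : Nat) (ds : List Char), n < fuel →
    charSum (Nat.toDigitsCore 10 fuel n ds) % 9 = ((n : Int) + charSum ds) % 9 := by
  induction fuel with
  | zero => intro n ds h; omega
  | succ fuel ih =>
    intro n ds h
    show charSum (if n / 10 = 0 then (n % 10).digitChar :: ds
          else Nat.toDigitsCore 10 fuel (n / 10) ((n % 10).digitChar :: ds)) % 9 = _
    have hd : charSum ((n % 10).digitChar :: ds) = ((n % 10 : Nat) : Int) + charSum ds := by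
      have h10 : n % 10 < 10 := Nat.mod_lt _ (by omega)
      rw [charSum]
      interval_cases h : n % 10 <;> simp [Nat.digitChar]
    by_cases h0 : n / 10 = 0
    · rw [if_pos h0, hd]
      have : (n : Int) = ((n % 10 : Nat) : Int) := by omega
      rw [this]
    · rw [if_neg h0]
      have hlt : n / 10 < fuel := by omega
      rw [ih _ _ hlt, hd]
      have : ((n / 10 : Nat) : Int) + (((n % 10 : Nat) : Int) + charSum ds)
           = (n : Int) + charSum ds - 9 * ((n / 10 : Nat) : Int) := by
        have := Nat.div_add_mod n 10
        push_cast
        omega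
      rw [this]
      omega

lemma charSum_toChars (n : Int) : charSum (PySem.Int.toChars n) % 9 = ((n.natAbs : Int)) % 9 := by
  unfold PySem.Int.toChars
  by_cases hn : n < 0
  · rw [if_pos hn]
    rw [charSum, if_pos rfl, zero_add]
    have := charSum_toDigitsCore (n.natAbs + 1) n.natAbs [] (by omega)
    simpa [Nat.toDigits, charSum] using this
  · rw [if_neg hn]
    have := charSum_toDigitsCore (n.toNat + 1) n.toNat [] (by omega)
    simp only [Nat.toDigits] at this ⊢
    rw [this]
    simp only [charSum, add_zero]
    congr 1
    omega

lemma dvd_charSum_iff (n : Int) :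
    (9 : Int) ∣ n ↔ (9 : Int) ∣ charSum ((PySem.Int.toStr n).toList) := by
  rw [PySem.Int.toList_toStr, ← Int.dvd_natAbs, Int.dvd_iff_emod_eq_zero,
    Int.dvd_iff_emod_eq_zero, ← charSum_toChars n]

-- ===== VERDICT (by name: the statement is the Claim_ definition above) =====
theorem isLegal_spec : Claim_equal_isLegal := by
  intro n _
  unfold Spec_isLegal isLegal isLegal_alt
  rw [foldl_altStep, isLegalLoop_eq]
  have key : (9 : Int) ∣ n ↔ (9 : Int) ∣ charSum (PySem.Int.toChars n) := by
    simpa [PySem.Int.toList_toStr] using dvd_charSum_iff n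
  simp only [PySem.Int.mod_eq_zero_iff_dvd, zero_add, Bool.false_or]
  by_cases h9 : '9' ∈ PySem.Int.toChars n
  · by_cases hm : (9 : Int) ∣ n <;> simp [hm, h9]
  · by_cases hm : (9 : Int) ∣ n
    · simp [hm, h9, key.mp hm]
    · have h2 : ¬ (9 : Int) ∣ charSum (PySem.Int.toChars n) := fun hc => hm (key.mpr hc)
      simp [hm, h9, h2]
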